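-- pv_equiv track=rewrite | github.com/pgfoster/p4-phylogenetics | p4/stmcmc.py | bitReduce
-- ===== SOURCE A (Python) =====
-- def bitReduce(bk, txBits, lLen, sLen, allOnes):
--     # print "bitReduce: bk %i, txBits %i, lLen %i, sLen %i, allOnes %i" % (bk,
--     # txBits, lLen, sLen, allOnes)
--     newBk = 0
--     counter = 0
--     pops = 0
--     for pos in range(lLen):
--         tester = 1 << pos
--         # print "pos %2i, tester: %3i" % (pos, tester)
--         if tester & txBits:
--             # print "    tester & txBits -- True"
--             if tester & bk:
--                 adder = 1 << counter
--                 # print "        adding:", adder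
--                 newBk += adder
--                 pops += 1
--             else:
--                 # print "        not adding"
--                 pass
--             counter += 1
--     if (1 & newBk):
--         # print "flipping"
--         newBk = allOnes ^ newBk
--         pops = sLen - pops
--     # print "returning newBk %i, pops %i" % (newBk, pops)
--     return newBk, pops
-- ===== SOURCE B (Python) =====
-- def bitReduce(bk, txBits, lLen, sLen, allOnes):
--     # Mask txBits to its low lLen bits, then walk only its SET bits with the
--     # lowest-set-bit trick (low = t & -t; t ^= low), instead of scanning every
--     # position 0..lLen-1 and testing membership as A does.
--     t = txBits & ((1 << lLen) - 1) if lLen > 0 else 0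
--     newBk = 0
--     counter = 0
--     pops = 0
--     while t:
--         low = t & -t
--         if bk & low:
--             newBk += 1 << counter
--             pops += 1
--         counter += 1
--         t ^= low
--     if newBk & 1:
--         newBk = allOnes ^ newBk
--         pops = sLen - pops
--     return newBk, pops
-- ===== Notes on version B (the rewrite author's own statement) =====
-- stated objective: faster
-- what changed: B masks txBits to its low lLen bits once and then iterates only over the SET bits of that mask via the lowest-set-bit trick (low = t & -t; t ^= low), instead of A's scan of every position 0..lLen-1 with a fresh 1<<pos tester and a membership test per position.
import Mathlib
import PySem

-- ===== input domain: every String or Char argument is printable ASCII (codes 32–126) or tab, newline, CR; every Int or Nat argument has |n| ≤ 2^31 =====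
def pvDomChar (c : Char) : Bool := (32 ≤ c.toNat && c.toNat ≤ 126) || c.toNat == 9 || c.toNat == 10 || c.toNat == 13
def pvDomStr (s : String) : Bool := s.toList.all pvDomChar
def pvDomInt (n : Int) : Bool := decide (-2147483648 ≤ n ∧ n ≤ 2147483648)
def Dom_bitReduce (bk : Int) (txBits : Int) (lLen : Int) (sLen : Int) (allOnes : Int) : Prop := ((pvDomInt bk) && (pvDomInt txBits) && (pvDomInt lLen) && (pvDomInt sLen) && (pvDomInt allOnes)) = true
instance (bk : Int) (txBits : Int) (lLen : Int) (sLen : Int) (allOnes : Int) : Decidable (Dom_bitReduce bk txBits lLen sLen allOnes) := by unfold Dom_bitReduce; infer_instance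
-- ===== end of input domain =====

-- B masks txBits to its low lLen bits and then iterates only over the set bits of
-- that mask with the lowest-set-bit trick (low = t & -t; t ^= low), instead of
-- A's per-position scan with a 1<<pos tester (objective: faster; measured).

-- ===== PORT A =====
-- the body of A's for-loop over `pos`, acting on the state (newBk, counter, pops)
def bitReduceStep (bk : Int) (txBits : Int) (st : Int × Int × Int) (pos : Int) : Int × Int × Int :=
  let tester : Int := (1 : Int) <<< pos.toNat
  if PySem.Int.band tester txBits ≠ 0 then
    if PySem.Int.band tester bk ≠ 0 then
      (st.1 + ((1 : Int) <<< st.2.1.toNat), st.2.1 + 1, st.2.2 + 1)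
    else
      (st.1, st.2.1 + 1, st.2.2)
  else st

def bitReduce (bk : Int) (txBits : Int) (lLen : Int) (sLen : Int) (allOnes : Int) : Int × Int :=
  let st := (PySem.List.pyRange 0 lLen 1).foldl (bitReduceStep bk txBits) (0, 0, 0)
  let newBk := st.1
  let pops := st.2.2
  if PySem.Int.band 1 newBk ≠ 0 then
    (PySem.Int.bxor allOnes newBk, sLen - pops)
  else
    (newBk, pops)

-- ===== PORT B =====
-- Nat-level facts about the lowest-set-bit trick, needed by port B's termination
-- (the while loop strictly decreases t = t ^ (t & -t)).
def natLow (m : Nat) : Nat := m - (m &&& (m-1))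

lemma and_two_mul_left (v w : Nat) : (2*v) &&& w = 2 * (v &&& (w/2)) := by
  apply Nat.eq_of_testBit_eq; intro i
  cases i with
  | zero => simp [Nat.testBit_zero, Nat.mul_mod_right]
  | succ i =>
      simp only [Nat.testBit_and]
      simp [Nat.testBit_succ, Nat.testBit_and]

lemma xor_two_mul (a b : Nat) : (2*a) ^^^ (2*b) = 2 * (a ^^^ b) := by
  apply Nat.eq_of_testBit_eq; intro i
  cases i with
  | zero => simp [Nat.testBit_zero, Nat.mul_mod_right]
  | succ i =>
      simp only [Nat.testBit_xor]
      simp [Nat.testBit_succ, Nat.testBit_xor]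

lemma two_mul_xor_one (a : Nat) : (2*a) ^^^ 1 = 2*a + 1 := by
  apply Nat.eq_of_testBit_eq; intro i
  cases i with
  | zero => simp [Nat.testBit_zero, Nat.mul_mod_right, Nat.add_mul_mod_self_left]
  | succ i =>
      simp only [Nat.testBit_xor]
      simp only [Nat.testBit_succ]
      rw [show (2*a+1)/2 = a by omega, show (1:Nat)/2 = 0 by norm_num]
      simp

lemma odd_and_pred (a : Nat) : (2*a+1) &&& (2*a) = 2*a := by
  rw [Nat.and_comm, and_two_mul_left]
  simp [Nat.mul_add_div]

lemma natLow_odd (a : Nat) : natLow (2*a+1) = 1 := by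
  simp [natLow, odd_and_pred]

lemma natLow_even (u : Nat) (h : 0 < u) : natLow (2*u) = 2 * natLow u := by
  have h1 : (2*u) &&& (2*u-1) = 2 * (u &&& (u-1)) := by
    rw [and_two_mul_left]; congr 2; omega
  simp only [natLow, h1]
  have := @Nat.and_le_right u (u-1)
  omega

lemma xor_natLow (m : Nat) (h : 0 < m) : m ^^^ natLow m = m &&& (m-1) := by
  induction m using Nat.strong_induction_on with
  | _ m ih =>
    rcases Nat.even_or_odd m with he | ho
    · obtain ⟨u, hu⟩ := he
      have hu2 : m = 2*u := by omega
      subst hu2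
      have hu0 : 0 < u := by omega
      rw [natLow_even u hu0, xor_two_mul, ih u (by omega) hu0, and_two_mul_left]
      congr 2
      omega
    · obtain ⟨a, ha⟩ := ho
      subst ha
      rw [natLow_odd]
      have h1 : (2*a+1) ^^^ 1 = 2*a := by
        rw [show (2*a+1 : Nat) = (2*a) ^^^ 1 by rw [two_mul_xor_one],
          Nat.xor_assoc, Nat.xor_self, Nat.xor_zero]
      rw [h1]
      have h2 : (2*a+1) &&& (2*a+1-1) = 2*a := by simpa using odd_and_pred a
      omega

lemma and_pred_lt (m : Nat) (h : 0 < m) : m &&& (m-1) < m := by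
  have := @Nat.and_le_right m (m-1); omega

-- t & -t for positive t, over the integers
lemma band_neg_self (m : Nat) (h : 0 < m) :
    PySem.Int.band (m : Int) (-(m : Int)) = (natLow m : Int) := by
  rw [PySem.Int.band]
  rw [if_pos (by positivity), if_neg (by omega)]
  have h1 : (-(-(m:Int)) - 1).toNat = m - 1 := by omega
  rw [h1, Int.toNat_natCast, natLow]

lemma bxor_band_neg_toNat_lt (t : Int) (h : 0 < t) :
    (PySem.Int.bxor t (PySem.Int.band t (-t))).toNat < t.toNat := by
  obtain ⟨m, hm⟩ : ∃ m : Nat, t = (m : Int) := ⟨t.toNat, by omega⟩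
  subst hm
  have hm0 : 0 < m := by omega
  rw [band_neg_self m hm0, PySem.Int.bxor_natCast, xor_natLow m hm0,
    Int.toNat_natCast, Int.toNat_natCast]
  exact and_pred_lt m hm0

-- the while loop of B: state (newBk, counter, pops); guard `while t` with t ≥ 0
def bitReduceAltLoop (bk : Int) (t : Int) (st : Int × Int × Int) : Int × Int × Int :=
  if h : 0 < t then
    bitReduceAltLoop bk (PySem.Int.bxor t (PySem.Int.band t (-t)))
      (if PySem.Int.band bk (PySem.Int.band t (-t)) ≠ 0 then
        (st.1 + ((1 : Int) <<< st.2.1.toNat), st.2.1 + 1, st.2.2 + 1)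
      else
        (st.1, st.2.1 + 1, st.2.2))
  else st
termination_by t.toNat
decreasing_by exact bxor_band_neg_toNat_lt t h

def bitReduce_alt (bk : Int) (txBits : Int) (lLen : Int) (sLen : Int) (allOnes : Int) : Int × Int :=
  let t : Int := if 0 < lLen then PySem.Int.band txBits (((1 : Int) <<< lLen.toNat) - 1) else 0
  let st := bitReduceAltLoop bk t (0, 0, 0)
  let newBk := st.1
  let pops := st.2.2
  if PySem.Int.band newBk 1 ≠ 0 then
    (PySem.Int.bxor allOnes newBk, sLen - pops)
  else
    (newBk, pops)

-- ===== PRECONDITION & SPEC =====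
def Spec_bitReduce (bk : Int) (txBits : Int) (lLen : Int) (sLen : Int) (allOnes : Int) (out : Int × Int) : Prop := out = bitReduce_alt bk txBits lLen sLen allOnes
instance (bk : Int) (txBits : Int) (lLen : Int) (sLen : Int) (allOnes : Int) (out : Int × Int) : Decidable (Spec_bitReduce bk txBits lLen sLen allOnes out) := by unfold Spec_bitReduce; infer_instance

-- ===== CLAIM (what is proved, stated in full; the proofs are below) =====
def Claim_equal_bitReduce : Prop := ∀ (bk : Int) (txBits : Int) (lLen : Int) (sLen : Int) (allOnes : Int), Dom_bitReduce bk txBits lLen sLen allOnes → Spec_bitReduce bk txBits lLen sLen allOnes (bitReduce bk txBits lLen sLen allOnes)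

-- ===== LEMMAS AND PROOFS =====

lemma testBit_toNat (m k : Nat) : (m.testBit k).toNat = m / 2^k % 2 := by
  rcases Nat.mod_two_eq_zero_or_one (m / 2^k) with h | h <;>
    simp [Nat.testBit, Nat.shiftRight_eq_div_pow, h]

-- the bit of x at position k, as the {0,1}-valued integer (x >> k) & 1
def pvBit (x : Int) (k : Nat) : Int := PySem.Int.band (x >>> k) 1

-- the key bridge: (1 << k) & x  =  ((x >> k) & 1) << k, Python-exactly (also for x < 0)
lemma band_two_pow (k : Nat) (x : Int) :
    PySem.Int.band ((2:Int)^k) x = pvBit x k * 2^k := by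
  have hcast : ((2:Int)^k) = ((2^k : Nat) : Int) := by push_cast; ring
  cases x with
  | ofNat m =>
      have h1 : (Int.ofNat m) >>> k = Int.ofNat (m >>> k) := rfl
      rw [pvBit, h1, hcast]
      rw [show Int.ofNat m = ((m : Nat) : Int) from rfl,
        show Int.ofNat (m >>> k) = ((m >>> k : Nat) : Int) from rfl,
        show (1:Int) = ((1:Nat) : Int) from rfl]
      rw [PySem.Int.band_natCast, PySem.Int.band_natCast]
      rw [Nat.two_pow_and, Nat.and_one_is_mod, Nat.shiftRight_eq_div_pow, testBit_toNat]
      push_cast; ring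
  | negSucc m =>
      obtain ⟨q, hq⟩ : ∃ q, m >>> k = q := ⟨_, rfl⟩
      have h1 : (Int.negSucc m) >>> k = Int.negSucc q := hq ▸ rfl
      rw [pvBit, h1, hcast, PySem.Int.band, PySem.Int.band]
      have hnpos : ¬ (0:Int) ≤ Int.negSucc m := by
        rw [Int.negSucc_eq]; omega
      have hnpos' : ¬ (0:Int) ≤ Int.negSucc q := by
        rw [Int.negSucc_eq]; omega
      have hm : (-(Int.negSucc m) - 1).toNat = m := by
        rw [Int.negSucc_eq]; omega
      have hm' : (-(Int.negSucc q) - 1).toNat = q := by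
        rw [Int.negSucc_eq]; omega
      simp only [if_pos (show (0:Int) ≤ ((2^k : Nat) : Int) by positivity),
        if_neg hnpos, if_neg hnpos', if_pos (show (0:Int) ≤ 1 by norm_num),
        hm, hm', Int.toNat_natCast, Int.toNat_one]
      rw [Nat.shiftRight_eq_div_pow] at hq
      rw [Nat.two_pow_and, Nat.one_and_eq_mod_two, testBit_toNat, hq]
      rcases Nat.mod_two_eq_zero_or_one q with h | h <;> simp [h]

lemma pvBit_cases (x : Int) (k : Nat) : pvBit x k = 0 ∨ pvBit x k = 1 := by
  cases x with
  | ofNat m =>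
      have h1 : (Int.ofNat m) >>> k = Int.ofNat (m >>> k) := rfl
      rw [pvBit, h1, show Int.ofNat (m >>> k) = ((m >>> k : Nat) : Int) from rfl,
        show (1:Int) = ((1:Nat) : Int) from rfl, PySem.Int.band_natCast, Nat.and_one_is_mod]
      rcases Nat.mod_two_eq_zero_or_one (m >>> k) with h | h <;> simp [h]
  | negSucc m =>
      obtain ⟨q, hq⟩ : ∃ q, m >>> k = q := ⟨_, rfl⟩
      have h1 : (Int.negSucc m) >>> k = Int.negSucc q := hq ▸ rfl
      rw [pvBit, h1, PySem.Int.band]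
      have hnpos' : ¬ (0:Int) ≤ Int.negSucc q := by rw [Int.negSucc_eq]; omega
      have hm' : (-(Int.negSucc q) - 1).toNat = q := by rw [Int.negSucc_eq]; omega
      simp only [if_neg hnpos', if_pos (show (0:Int) ≤ 1 by norm_num), hm', Int.toNat_one,
        Nat.one_and_eq_mod_two]
      rcases Nat.mod_two_eq_zero_or_one q with h | h <;> simp [h]

lemma band_shift_ne (k : Nat) (x : Int) :
    (PySem.Int.band ((1:Int) <<< k) x ≠ 0) ↔ pvBit x k = 1 := by
  rw [Int.shiftLeft_eq, one_mul, band_two_pow]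
  have hk : (2:Int)^k ≠ 0 := by positivity
  rcases pvBit_cases x k with h | h <;> simp [h, hk]

lemma band_two_mul_right (x : Int) (v : Nat) :
    PySem.Int.band x ((2*v : Nat) : Int) = 2 * PySem.Int.band (x >>> (1:Nat)) (v : Int) := by
  cases x with
  | ofNat m =>
      have h1 : (Int.ofNat m) >>> (1:Nat) = Int.ofNat (m >>> 1) := rfl
      rw [h1, show Int.ofNat m = ((m:Nat):Int) from rfl,
        show Int.ofNat (m >>> 1) = ((m >>> 1 : Nat):Int) from rfl,
        PySem.Int.band_natCast, PySem.Int.band_natCast]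
      have : m &&& (2*v) = 2 * ((m >>> 1) &&& v) := by
        rw [Nat.and_comm, and_two_mul_left, Nat.and_comm, Nat.shiftRight_one]
      rw [this]; push_cast; ring
  | negSucc m =>
      obtain ⟨q, hq⟩ : ∃ q, m >>> 1 = q := ⟨_, rfl⟩
      have h1 : (Int.negSucc m) >>> (1:Nat) = Int.negSucc q := hq ▸ rfl
      rw [h1, PySem.Int.band, PySem.Int.band]
      have hn : ¬ (0:Int) ≤ Int.negSucc m := by rw [Int.negSucc_eq]; omega
      have hn' : ¬ (0:Int) ≤ Int.negSucc q := by rw [Int.negSucc_eq]; omega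
      have hm : (-(Int.negSucc m) - 1).toNat = m := by rw [Int.negSucc_eq]; omega
      have hm' : (-(Int.negSucc q) - 1).toNat = q := by rw [Int.negSucc_eq]; omega
      rw [if_neg hn, if_pos (by positivity), if_neg hn', if_pos (by positivity)]
      rw [hm, hm', Int.toNat_natCast, Int.toNat_natCast]
      rw [Nat.shiftRight_one] at hq
      have h2 : (2*v) &&& m = 2 * (v &&& q) := by rw [and_two_mul_left, hq]
      have h3 : v &&& q ≤ v := Nat.and_le_left
      push_cast [h2]
      omega

lemma band_mask (a : Int) (n : Nat) :
    PySem.Int.band a ((2:Int)^n - 1) = a % ((2:Int)^n) := by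
  have hcast : ((2:Int)^n - 1) = (((2^n - 1 : Nat)) : Int) := by
    have : (1:Nat) ≤ 2^n := Nat.one_le_two_pow
    push_cast [this]; ring
  by_cases ha : 0 ≤ a
  · obtain ⟨m, hm⟩ : ∃ m : Nat, a = (m : Int) := ⟨a.toNat, by omega⟩
    subst hm
    rw [hcast, PySem.Int.band_natCast, Nat.and_two_pow_sub_one_eq_mod]
    have h2 : ((2:Int)^n) = ((2^n : Nat) : Int) := by push_cast; ring
    rw [h2, Int.natCast_mod]
  · have hp : (0:Int) < 2^n := pow_pos (by norm_num) n
    rw [PySem.Int.band, if_neg (by omega), if_pos (by omega)]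
    set w : Nat := (-a - 1).toNat with hw
    have haw : a = -(w : Int) - 1 := by omega
    have h1 : ((2:Int)^n - 1).toNat = 2^n - 1 := by
      have : (1:Nat) ≤ 2^n := Nat.one_le_two_pow
      omega
    rw [h1, Nat.and_comm, Nat.and_two_pow_sub_one_eq_mod]
    set r : Nat := w % 2^n with hr
    have hrlt : r < 2^n := Nat.mod_lt _ (Nat.two_pow_pos n)
    obtain ⟨q, hq⟩ : ∃ q : Nat, w = 2^n * q + r := ⟨w / 2^n, by rw [hr, Nat.div_add_mod]⟩
    have hdecomp : a = (2:Int)^n * (-(q:Int) - 1) + ((2:Int)^n - 1 - (r:Int)) := by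
      rw [haw]
      have : (w:Int) = (2:Int)^n * q + r := by push_cast [hq]; ring
      rw [this]; ring
    have h2 : ((2:Int)^n) = ((2^n:Nat):Int) := by push_cast; ring
    rw [hdecomp, add_comm ((2:Int)^n * (-(q:Int) - 1)), Int.add_mul_emod_self_left]
    rw [Int.emod_eq_of_lt (by rw [h2]; omega) (by rw [h2]; omega), h2]
    omega

-- common specification recursion: one gfold level per bit position, shifting
-- both bk and tx right by one each level
def gstep (bk tx : Int) (st : Int × Int × Int) : Int × Int × Int :=
  if PySem.Int.band tx 1 ≠ 0 then
    if PySem.Int.band bk 1 ≠ 0 then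
      (st.1 + ((1 : Int) <<< st.2.1.toNat), st.2.1 + 1, st.2.2 + 1)
    else
      (st.1, st.2.1 + 1, st.2.2)
  else st

def gfold : Int → Int → Nat → Int × Int × Int → Int × Int × Int
  | _, _, 0, st => st
  | bk, tx, n+1, st => gfold (bk >>> (1:Nat)) (tx >>> (1:Nat)) n (gstep bk tx st)

lemma gfold_zero (bk : Int) (n : Nat) (st : Int × Int × Int) :
    gfold bk 0 n st = st := by
  induction n generalizing bk with
  | zero => rfl
  | succ n ih =>
      show gfold (bk >>> (1:Nat)) ((0:Int) >>> (1:Nat)) n (gstep bk 0 st) = st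
      have h0 : ((0:Int) >>> (1:Nat)) = 0 := rfl
      have h1 : gstep bk 0 st = st := by simp [gstep, PySem.Int.band]
      rw [h0, h1, ih]

-- the bit of x at k+1 is the bit of x>>1 at k
lemma pvBit_succ (x : Int) (k : Nat) : pvBit x (k+1) = pvBit (x >>> (1:Nat)) k := by
  rw [pvBit, pvBit, show k+1 = 1+k from Nat.add_comm k 1, Int.shiftRight_add]

-- A's loop body at position 0 is gstep
lemma step_zero (bk tx : Int) (st : Int × Int × Int) :
    bitReduceStep bk tx st 0 = gstep bk tx st := by
  simp only [bitReduceStep, gstep, Int.toNat_zero, Int.shiftLeft_zero]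
  rw [PySem.Int.band_comm 1 tx, PySem.Int.band_comm 1 bk]

-- A's loop body at position k+1 is the body at position k with bk, tx shifted
lemma step_shift (bk tx : Int) (k : Nat) (st : Int × Int × Int) :
    bitReduceStep bk tx st ((k:Int)+1) = bitReduceStep (bk >>> (1:Nat)) (tx >>> (1:Nat)) st (k:Int) := by
  have hT : (((k:Int)+1)).toNat = k+1 := by omega
  have h1 : (PySem.Int.band ((1:Int) <<< (k+1)) tx ≠ 0)
      ↔ (PySem.Int.band ((1:Int) <<< k) (tx >>> (1:Nat)) ≠ 0) := by
    rw [band_shift_ne, band_shift_ne, pvBit_succ]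
  have h2 : (PySem.Int.band ((1:Int) <<< (k+1)) bk ≠ 0)
      ↔ (PySem.Int.band ((1:Int) <<< k) (bk >>> (1:Nat)) ≠ 0) := by
    rw [band_shift_ne, band_shift_ne, pvBit_succ]
  simp only [bitReduceStep, hT, Int.toNat_natCast, h1, h2]
  rfl

-- A-side: the range(lLen) fold equals gfold
lemma foldA (n : Nat) : ∀ (bk tx : Int) (st : Int × Int × Int),
    (PySem.List.pyRange 0 (n : Int) 1).foldl (bitReduceStep bk tx) st = gfold bk tx n st := by
  induction n with
  | zero => intro bk tx st; rfl
  | succ n ih =>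
      intro bk tx st
      rw [PySem.List.pyRange_one_cons (by omega : (0:Int) < (n+1 : Nat))]
      rw [show ((n+1 : Nat) : Int) = ((n:Int)+1) by push_cast; ring]
      simp only [zero_add]
      have hrange : PySem.List.pyRange 1 ((n:Int)+1) 1
          = (PySem.List.pyRange 0 (n:Int) 1).map (fun k => k + 1) := by
        rw [PySem.List.pyRange_one, PySem.List.pyRange_one]
        rw [show ((n:Int)+1-1) = (n:Int) by ring, show ((n:Int)-0) = (n:Int) by ring]
        rw [List.map_map]
        apply List.map_congr_left
        intro k _
        simp; ring
      rw [hrange, List.foldl_cons, List.foldl_map]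
      have hfun : ∀ (st' : Int × Int × Int) (k : Int), k ∈ PySem.List.pyRange 0 (n:Int) 1 →
          bitReduceStep bk tx st' (k + 1) = bitReduceStep (bk >>> (1:Nat)) (tx >>> (1:Nat)) st' k := by
        intro st' k hk
        rw [PySem.List.mem_pyRange_one] at hk
        obtain ⟨j, hj⟩ : ∃ j : Nat, k = (j : Int) := ⟨k.toNat, by omega⟩
        subst hj
        exact step_shift bk tx j st'
      calc (PySem.List.pyRange 0 (n:Int) 1).foldl
            (fun st' k => bitReduceStep bk tx st' (k + 1)) (bitReduceStep bk tx st 0)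
          = (PySem.List.pyRange 0 (n:Int) 1).foldl
            (bitReduceStep (bk >>> (1:Nat)) (tx >>> (1:Nat))) (bitReduceStep bk tx st 0) := by
            exact PySem.List.foldl_congr_mem _ _ _ _ hfun
        _ = gfold bk tx (n+1) st := by
            rw [ih, step_zero]; rfl

-- B-side halving: the loop on an even t equals the loop on t/2 with bk shifted
lemma loop_even (u : Nat) : ∀ (bk : Int) (st : Int × Int × Int),
    bitReduceAltLoop bk ((2*u : Nat) : Int) st = bitReduceAltLoop (bk >>> (1:Nat)) (u : Int) st := by
  induction u using Nat.strong_induction_on with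
  | _ u ih =>
    intro bk st
    rcases Nat.eq_zero_or_pos u with hu0 | hu0
    · subst hu0
      conv_lhs => rw [bitReduceAltLoop]
      conv_rhs => rw [bitReduceAltLoop]
      norm_num
    · have hL : (0:Int) < ((2*u : Nat) : Int) := by push_cast; omega
      have hR : (0:Int) < ((u : Nat) : Int) := by push_cast; omega
      conv_lhs => rw [bitReduceAltLoop]
      rw [dif_pos hL]
      conv_rhs => rw [bitReduceAltLoop]
      rw [dif_pos hR]
      rw [band_neg_self (2*u) (by omega), band_neg_self u hu0, natLow_even u hu0]
      rw [band_two_mul_right bk (natLow u)]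
      rw [PySem.Int.bxor_natCast, PySem.Int.bxor_natCast, xor_two_mul]
      have hguard : (2 * PySem.Int.band (bk >>> (1:Nat)) ((natLow u : Nat) : Int) ≠ 0)
          ↔ (PySem.Int.band (bk >>> (1:Nat)) ((natLow u : Nat) : Int) ≠ 0) := by
        constructor <;> intro h <;> omega
      have hlt : (u ^^^ natLow u) < u := by
        rw [xor_natLow u hu0]; exact and_pred_lt u hu0
      by_cases hb : PySem.Int.band (bk >>> (1:Nat)) ((natLow u : Nat) : Int) ≠ 0
      · rw [if_pos (hguard.mpr hb), if_pos hb]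
        exact ih (u ^^^ natLow u) hlt bk _
      · rw [if_neg (fun h => hb (hguard.mp h)), if_neg hb]
        exact ih (u ^^^ natLow u) hlt bk _

lemma odd_xor_one (a : Nat) : (2*a+1) ^^^ 1 = 2*a := by
  rw [show (2*a+1 : Nat) = (2*a) ^^^ 1 by rw [two_mul_xor_one],
    Nat.xor_assoc, Nat.xor_self, Nat.xor_zero]

lemma natCast_shiftRight_one (m : Nat) : ((m : Int) >>> (1:Nat)) = ((m / 2 : Nat) : Int) := by
  have h1 : ((m : Int) >>> (1:Nat)) = (m : Int) / 2 := by
    rw [Int.shiftRight_eq_div_pow]; norm_num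
  rw [h1]; omega

-- B-side: the loop equals gfold when t fits in n bits
lemma loopB (n : Nat) : ∀ (bk t : Int) (st : Int × Int × Int), 0 ≤ t → t < 2^n →
    bitReduceAltLoop bk t st = gfold bk t n st := by
  induction n with
  | zero =>
      intro bk t st h0 h1
      have ht : t = 0 := by norm_num at h1; omega
      subst ht
      rw [bitReduceAltLoop]; norm_num; rfl
  | succ n ih =>
      intro bk t st h0 h1
      obtain ⟨m, hm⟩ : ∃ m : Nat, t = (m : Int) := ⟨t.toNat, by omega⟩
      subst hm
      rcases Nat.eq_zero_or_pos m with hm0 | hm0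
      · subst hm0
        rw [show ((0:Nat):Int) = 0 from rfl, gfold_zero]
        conv_lhs => rw [bitReduceAltLoop]
        norm_num
      · rcases Nat.even_or_odd m with he | ho
        · -- even m = 2u, u > 0
          obtain ⟨u, hu⟩ := he
          have hu2 : m = 2*u := by omega
          subst hu2
          have hu0 : 0 < u := by omega
          rw [loop_even u bk st]
          have hu1 : (u : Int) < 2^n := by
            have h2 : ((2:Int)^(n+1)) = 2 * 2^n := by ring
            rw [h2] at h1; push_cast at h1 ⊢; omega
          rw [ih (bk >>> (1:Nat)) (u : Int) st (by positivity) hu1]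
          show _ = gfold (bk >>> (1:Nat)) (((2*u : Nat) : Int) >>> (1:Nat)) n (gstep bk ((2*u : Nat) : Int) st)
          have hsh : (((2*u : Nat) : Int) >>> (1:Nat)) = (u : Int) := by
            rw [natCast_shiftRight_one]; congr 1; omega
          have hst : gstep bk ((2*u : Nat) : Int) st = st := by
            rw [gstep, PySem.Int.band_one]
            rw [PySem.Int.mod_eq_emod_of_pos (by norm_num)]
            have : ((2*u : Nat) : Int) % 2 = 0 := by push_cast; omega
            simp [this]
          rw [hsh, hst]
        · -- odd m = 2a+1
          obtain ⟨a, ha⟩ := ho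
          subst ha
          conv_lhs => rw [bitReduceAltLoop]
          rw [dif_pos (by push_cast; omega : (0:Int) < ((2*a+1 : Nat) : Int))]
          rw [band_neg_self (2*a+1) (by omega), natLow_odd a]
          have hbx : PySem.Int.bxor ((2*a+1 : Nat) : Int) (((1:Nat)) : Int) = ((2*a : Nat) : Int) := by
            rw [PySem.Int.bxor_natCast, odd_xor_one]
          rw [hbx, Nat.cast_one]
          rw [loop_even a bk _]
          have ha1 : (a : Int) < 2^n := by
            have h2 : ((2:Int)^(n+1)) = 2 * 2^n := by ring
            rw [h2] at h1; push_cast at h1 ⊢; omega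
          rw [ih (bk >>> (1:Nat)) (a : Int) _ (by positivity) ha1]
          show _ = gfold (bk >>> (1:Nat)) (((2*a+1 : Nat) : Int) >>> (1:Nat)) n (gstep bk ((2*a+1 : Nat) : Int) st)
          have hsh : (((2*a+1 : Nat) : Int) >>> (1:Nat)) = (a : Int) := by
            rw [natCast_shiftRight_one]; congr 1; omega
          have hst : gstep bk ((2*a+1 : Nat) : Int) st
              = (if PySem.Int.band bk 1 ≠ 0 then
                  (st.1 + ((1 : Int) <<< st.2.1.toNat), st.2.1 + 1, st.2.2 + 1)
                else (st.1, st.2.1 + 1, st.2.2)) := by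
            rw [gstep, PySem.Int.band_one, PySem.Int.mod_eq_emod_of_pos (by norm_num)]
            have : ((2*a+1 : Nat) : Int) % 2 = 1 := by push_cast; omega
            simp only [this]
            norm_num
          rw [hsh, hst]

-- the low bits of a floor-mod: (a % 2^(n+1)) / 2 = (a / 2) % 2^n
lemma emod_two_pow_shift (a : Int) (n : Nat) :
    (a % ((2:Int)^(n+1))) / 2 = (a / 2) % ((2:Int)^n) := by
  have hc : (0:Int) < 2^n := pow_pos (by norm_num) n
  set c : Int := (2:Int)^n with hcdef
  have hP : ((2:Int)^(n+1)) = 2*c := by rw [hcdef]; ring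
  set r : Int := a % (2*c) with hr
  have hr0 : 0 ≤ r := Int.emod_nonneg _ (by omega)
  have hr1 : r < 2*c := Int.emod_lt_of_pos _ (by omega)
  have hrange : 0 ≤ r/2 ∧ r/2 < c := by omega
  obtain ⟨q, hq⟩ : ∃ q : Int, a = 2*c*q + r := ⟨a / (2*c), by
    rw [hr]; linarith [Int.ediv_add_emod a (2*c)]⟩
  have hhalf : a / 2 = c*q + r/2 := by
    rw [hq, show (2*c*q + r) = r + 2*(c*q) by ring, Int.add_mul_ediv_left _ _ (by norm_num : (2:Int) ≠ 0)]
    ring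
  rw [hP, ← hr, hhalf, show (c*q + r/2) = r/2 + c*q by ring, Int.add_mul_emod_self_left]
  exact (Int.emod_eq_of_lt hrange.1 hrange.2).symm

-- masking tx to n bits does not change gfold
lemma gfold_mask (n : Nat) : ∀ (bk tx : Int) (st : Int × Int × Int),
    gfold bk (PySem.Int.band tx ((2:Int)^n - 1)) n st = gfold bk tx n st := by
  induction n with
  | zero => intro bk tx st; rfl
  | succ n ih =>
      intro bk tx st
      rw [band_mask]
      show gfold (bk >>> (1:Nat)) ((tx % ((2:Int)^(n+1))) >>> (1:Nat)) n (gstep bk (tx % ((2:Int)^(n+1))) st)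
        = gfold (bk >>> (1:Nat)) (tx >>> (1:Nat)) n (gstep bk tx st)
      have hst : gstep bk (tx % ((2:Int)^(n+1))) st = gstep bk tx st := by
        simp only [gstep, PySem.Int.band_one,
          PySem.Int.mod_eq_emod_of_pos (show (0:Int) < 2 by norm_num),
          Int.emod_emod_of_dvd tx (show (2:Int) ∣ 2^(n+1) from ⟨2^n, by ring⟩)]
      have hsh : ((tx % ((2:Int)^(n+1))) >>> (1:Nat)) = PySem.Int.band (tx >>> (1:Nat)) ((2:Int)^n - 1) := by
        rw [band_mask]
        rw [show ((tx % ((2:Int)^(n+1))) >>> (1:Nat)) = (tx % ((2:Int)^(n+1))) / 2 by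
          rw [Int.shiftRight_eq_div_pow]; norm_num]
        rw [show (tx >>> (1:Nat)) = tx / 2 by rw [Int.shiftRight_eq_div_pow]; norm_num]
        exact emod_two_pow_shift tx n
      rw [hst, hsh, ih]

-- range(lLen) only depends on the clamped length
lemma range_clamp (lLen : Int) :
    PySem.List.pyRange 0 lLen 1 = PySem.List.pyRange 0 ((lLen.toNat : Nat) : Int) 1 := by
  by_cases h : 0 ≤ lLen
  · rw [Int.toNat_of_nonneg h]
  · rw [PySem.List.pyRange_one_eq_nil (by omega),
      PySem.List.pyRange_one_eq_nil (by omega)]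

-- ===== VERDICT (by name: the statement is the Claim_ definition above) =====
theorem bitReduce_spec : Claim_equal_bitReduce := by
  intro bk txBits lLen sLen allOnes _
  unfold Spec_bitReduce bitReduce bitReduce_alt
  dsimp only
  rw [range_clamp, foldA]
  by_cases h : 0 < lLen
  · rw [if_pos h]
    set n := lLen.toNat with hn
    have hpow : ((1 : Int) <<< n) - 1 = (2:Int)^n - 1 := by
      rw [Int.shiftLeft_eq, one_mul]
    rw [hpow]
    have hp : (0:Int) < 2^n := pow_pos (by norm_num) n
    have ht0 : 0 ≤ PySem.Int.band txBits ((2:Int)^n - 1) := by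
      rw [band_mask]; exact Int.emod_nonneg _ (by omega)
    have ht1 : PySem.Int.band txBits ((2:Int)^n - 1) < 2^n := by
      rw [band_mask]; exact Int.emod_lt_of_pos _ hp
    rw [loopB n bk _ _ ht0 ht1, gfold_mask]
    rw [PySem.Int.band_comm 1]
  · rw [if_neg h]
    have hn : lLen.toNat = 0 := by omega
    rw [hn]
    show _ = (if PySem.Int.band (bitReduceAltLoop bk 0 (0,0,0)).1 1 ≠ 0 then _ else _ : Int × Int)
    rw [show bitReduceAltLoop bk 0 (0,0,0) = (0,0,0) by rw [bitReduceAltLoop]; norm_num]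
    show (if PySem.Int.band 1 (gfold bk txBits 0 (0,0,0)).1 ≠ 0 then _ else _ : Int × Int) = _
    rw [show gfold bk txBits 0 (0,0,0) = (0,0,0) from rfl]
    rw [PySem.Int.band_comm 1]
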